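-- pv_equiv track=rewrite | github.com/DanieleSavino/Progettazione_di_Algoritmi | generate_readme.py | generate_code_description
-- ===== SOURCE A (Python) =====
-- def generate_code_description(code: list[str]) -> list[str]:
--     description = []
--
--     first_found = None
--     for i in range(len(code)-1, -1, -1):
--         line = code[i].strip()
--         if not line.startswith('"""'):
--             continue
--
--         if first_found is None:
--             first_found = i
--             continue
--
--         description = [l.strip() for l in code[i+1:first_found]]
--
--         del code[i:first_found+1]
--         break
--
--     return description
-- ===== SOURCE B (Python) =====
-- def generate_code_description(code: list[str]) -> list[str]:
--     idx = [i for i, l in enumerate(code) if l.strip().startswith('"""')]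
--     if len(idx) < 2:
--         return []
--     a, b = idx[-2], idx[-1]
--     description = [l.strip() for l in code[a+1:b]]
--     del code[a:b+1]
--     return description
-- ===== Notes on version B (the rewrite author's own statement) =====
-- stated objective: simpler
-- what changed: Replaces the backward index loop with two sentinel variables and a break by a single forward pass that collects all docstring-marker indices, then slices between the last two; both A and B mutate `code` identically (deleting the block), and the proof is about the return value.
import Mathlib
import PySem

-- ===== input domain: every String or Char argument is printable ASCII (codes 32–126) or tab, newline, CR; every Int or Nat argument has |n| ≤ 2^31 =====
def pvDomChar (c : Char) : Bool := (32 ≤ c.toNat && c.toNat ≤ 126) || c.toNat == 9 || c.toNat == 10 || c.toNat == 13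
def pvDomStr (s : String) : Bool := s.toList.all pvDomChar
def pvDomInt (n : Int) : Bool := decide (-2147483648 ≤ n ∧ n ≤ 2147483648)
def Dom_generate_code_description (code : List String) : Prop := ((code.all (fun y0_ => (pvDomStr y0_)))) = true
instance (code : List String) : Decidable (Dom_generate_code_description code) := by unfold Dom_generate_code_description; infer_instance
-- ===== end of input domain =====

-- B replaces A's backward scan with sentinels and break by one forward pass collecting all
-- marker indices, then slicing between the last two (objective: simpler). Both Pythons mutate
-- `code` identically (deleting the docstring block); the equivalence proved is about the return value.

-- ===== PORT A =====
-- the backward `for i in range(len(code)-1, -1, -1)` loop with its two state variables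
def pvALoop (code : List String) : List Int → Option Int → List String
  | [], _ => []
  | i :: rest, first_found =>
    let line := PySem.Str.strip (PySem.List.pyGetD code i "")
    if ¬ PySem.Str.startswith line "\"\"\"" then pvALoop code rest first_found
    else
      match first_found with
      | none => pvALoop code rest (some i)
      | some f => (PySem.List.slice code (some (i + 1)) (some f)).map PySem.Str.strip

def generate_code_description (code : List String) : List String :=
  pvALoop code (PySem.List.pyRange ((code.length : Int) - 1) (-1) (-1)) none

-- ===== PORT B =====
def generate_code_description_alt (code : List String) : List String :=
  let idx := (PySem.List.enumerate code 0).filterMap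
      (fun p => if PySem.Str.startswith (PySem.Str.strip p.2) "\"\"\"" then some p.1 else none)
  if idx.length < 2 then []
  else
    let a := PySem.List.pyGetD idx (-2) 0
    let b := PySem.List.pyGetD idx (-1) 0
    (PySem.List.slice code (some (a + 1)) (some b)).map PySem.Str.strip

-- ===== PRECONDITION & SPEC =====
def Spec_generate_code_description (code : List String) (out : List String) : Prop := out = generate_code_description_alt code
instance (code : List String) (out : List String) : Decidable (Spec_generate_code_description code out) := by unfold Spec_generate_code_description; infer_instance

-- ===== CLAIM (what is proved, stated in full; the proofs are below) =====
def Claim_equal_generate_code_description : Prop := ∀ (code : List String), Dom_generate_code_description code → Spec_generate_code_description code (generate_code_description code)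

-- ===== LEMMAS AND PROOFS =====

-- whether line i of `code` is a docstring marker (the test both programs apply)
def pvMark (code : List String) (i : Int) : Bool :=
  PySem.Str.startswith (PySem.Str.strip (PySem.List.pyGetD code i "")) "\"\"\""

theorem pvALoop_some (code : List String) (L : List Int) (f : Int) :
    pvALoop code L (some f) =
      match L.filter (pvMark code) with
      | a :: _ => (PySem.List.slice code (some (a + 1)) (some f)).map PySem.Str.strip
      | [] => [] := by
  induction L with
  | nil => rfl
  | cons i rest ih =>
    simp only [pvALoop]
    rw [show PySem.Str.startswith (PySem.Str.strip (PySem.List.pyGetD code i "")) "\"\"\"" = pvMark code i from rfl, List.filter_cons]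
    by_cases h : pvMark code i
    · simp [h]
    · simp [h, ih]

theorem pvALoop_none (code : List String) (L : List Int) :
    pvALoop code L none =
      match L.filter (pvMark code) with
      | b :: a :: _ => (PySem.List.slice code (some (a + 1)) (some b)).map PySem.Str.strip
      | _ => [] := by
  induction L with
  | nil => rfl
  | cons i rest ih =>
    simp only [pvALoop]
    rw [show PySem.Str.startswith (PySem.Str.strip (PySem.List.pyGetD code i "")) "\"\"\"" = pvMark code i from rfl, List.filter_cons]
    by_cases h : pvMark code i
    · simp only [h, not_true_eq_false, if_false, if_pos]
      rw [pvALoop_some]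
      cases List.filter (pvMark code) rest <;> rfl
    · simp [h, ih]

theorem pvFilterMap_if {α β : Type} (q : α → Bool) (f : α → β) (l : List α) :
    l.filterMap (fun x => if q x then some (f x) else none) =
      (l.filter q).map f := by
  induction l with
  | nil => rfl
  | cons x xs ih =>
    by_cases h : q x <;> simp [h, ih]

-- B's forward index table equals the filtered range A's loop walks (in forward order)
theorem pvIdx_eq (code : List String) :
    (PySem.List.enumerate code 0).filterMap
        (fun p => if PySem.Str.startswith (PySem.Str.strip p.2) "\"\"\"" then some p.1 else none) =
      (PySem.List.pyRange 0 (code.length : Int) 1).filter (pvMark code) := by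
  rw [pvFilterMap_if]
  have hrange : (PySem.List.pyRange 0 (code.length : Int) 1) =
      (PySem.List.enumerate code 0).map (·.1) := by
    rw [PySem.List.map_fst_enumerate]; norm_num
  rw [hrange, List.filter_map]
  refine congrArg (List.map _) (List.filter_congr ?_)
  intro p hp
  rw [PySem.List.mem_enumerate_iff] at hp
  obtain ⟨k, hk, rfl⟩ := hp
  simp only [Function.comp_apply]
  simp [pvMark, PySem.List.pyGetD_natCast, List.getElem?_eq_getElem hk]

theorem pvGetD_neg_one_pair (xs : List Int) (a b : Int) :
    PySem.List.pyGetD (xs ++ [a, b]) (-1) 0 = b := by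
  have : xs ++ [a, b] = (xs ++ [a]) ++ [b] := by simp
  rw [this, PySem.List.pyGetD_neg_one_append_singleton]

theorem pvGetD_neg_two_pair (xs : List Int) (a b : Int) :
    PySem.List.pyGetD (xs ++ [a, b]) (-2) 0 = a := by
  have hlen : (xs ++ [a, b]).length = xs.length + 2 := by simp
  rw [PySem.List.pyGetD_neg_ofNat _ 2 0 (by omega) (by omega)]
  simp [hlen, List.getElem_append_right]

-- ===== VERDICT (by name: the statement is the Claim_ definition above) =====
theorem generate_code_description_spec : Claim_equal_generate_code_description := by
  intro code _
  unfold Spec_generate_code_description generate_code_description generate_code_description_alt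
  rw [pvIdx_eq]
  have hrev : PySem.List.pyRange ((code.length : Int) - 1) (-1) (-1) =
      (PySem.List.pyRange 0 (code.length : Int) 1).reverse := by
    rw [PySem.List.pyRange_neg_one_eq_reverse]; norm_num
  rw [pvALoop_none, hrev, List.filter_reverse]
  set F := (PySem.List.pyRange 0 (code.length : Int) 1).filter (pvMark code) with hF
  match hFr : F.reverse with
  | [] =>
    have : F = [] := by simpa using congrArg List.reverse hFr
    simp [this]
  | [b] =>
    have : F = [b] := by simpa using congrArg List.reverse hFr
    simp [this]
  | b :: a :: rest =>
    have hFe : F = rest.reverse ++ [a, b] := by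
      have := congrArg List.reverse hFr
      simpa using this
    simp only [hFe, pvGetD_neg_one_pair, pvGetD_neg_two_pair]
    rw [if_neg (by simp)]
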